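-- pv_equiv track=rewrite | github.com/rob-bannocks/IndexExchange | utility.py | clense_ints
-- ===== SOURCE A (Python) =====
-- def clense_ints(int_feilds,csv,sentinel_value="-9999"):
-- 	header = csv[0]
-- 	for item in int_feilds:
-- 		headings = csv[0]
-- 		if headings.count(item)==1:
-- 			index = header.index(item)
-- 			for loc in range(1,len(csv)):
-- 				try:
-- 					throw_away = int(csv[loc][index])
-- 				except:
-- 					csv[loc][index] = sentinel_value
-- 	return csv
-- ===== SOURCE B (Python) =====
-- def _intlike(cell):
-- 	try:
-- 		int(cell)
-- 		return True
-- 	except ValueError: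
-- 		return False
--
-- def clense_ints(int_feilds, csv, sentinel_value="-9999"):
-- 	header = csv[0]
-- 	positions = {}
-- 	for j, name in enumerate(header):
-- 		positions[name] = positions.get(name, []) + [j]
-- 	targets = set()
-- 	for f in int_feilds:
-- 		occ = positions.get(f, [])
-- 		if len(occ) == 1:
-- 			targets.add(occ[0])
-- 	for loc in range(1, len(csv)):
-- 		csv[loc] = [sentinel_value if j in targets and not _intlike(cell) else cell
-- 		            for j, cell in enumerate(csv[loc])]
-- 	return csv
-- ===== Notes on version B (the rewrite author's own statement) =====
-- stated objective: faster
-- what changed: B replaces A's per-field count/index scans of the header and per-field sweeps over all rows by a hash index: one pass over the header builds a name->positions dict, one pass over int_feilds derives a set of target column indices, and each data row is rebuilt in a single enumerate pass testing set membership.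
import Mathlib
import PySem

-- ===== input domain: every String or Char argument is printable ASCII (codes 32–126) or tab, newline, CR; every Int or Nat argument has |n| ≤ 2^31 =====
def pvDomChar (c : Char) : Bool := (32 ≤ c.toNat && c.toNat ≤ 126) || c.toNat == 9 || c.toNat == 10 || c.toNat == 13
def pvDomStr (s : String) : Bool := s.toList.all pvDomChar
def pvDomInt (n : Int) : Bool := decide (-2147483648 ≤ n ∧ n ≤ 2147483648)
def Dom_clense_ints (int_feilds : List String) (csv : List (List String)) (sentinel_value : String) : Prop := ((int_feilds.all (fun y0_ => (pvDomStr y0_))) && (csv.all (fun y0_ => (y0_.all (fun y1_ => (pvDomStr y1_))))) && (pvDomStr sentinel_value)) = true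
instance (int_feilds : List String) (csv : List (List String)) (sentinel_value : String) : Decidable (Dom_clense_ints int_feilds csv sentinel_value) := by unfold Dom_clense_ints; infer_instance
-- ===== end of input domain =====

-- B replaces A's per-field header scans and per-field row sweeps by a name->positions dict,
-- a set of target column indices and a single enumerate pass per row (measured faster by the
-- timing run); equivalence is about the RETURN value (both Pythons mutate csv in place:
-- A rewrites cells, B replaces row lists).


-- ===== PORT A =====
-- try: int(row[index]) / except: row[index] = sentinel.  Out-of-range index means the
-- Python raises IndexError (excluded by Pre_); there the port's List.set is a no-op.
def pvFixA (sentinel_value : String) (index : Nat) (row : List String) : List String :=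
  match PySem.List.pyGet? row (index : Int) with
  | some cell =>
    match PySem.Int.ofStr? cell with
    | some _ => row
    | none => row.set index sentinel_value
  | none => row.set index sentinel_value

-- one iteration of A's outer 'for item in int_feilds' loop; the state is the whole csv
def pvStepA (header : List String) (sentinel_value : String)
    (state : List (List String)) (item : String) : List (List String) :=
  let headings := state.headD []
  if PySem.List.count headings item = 1 then
    match PySem.List.index? header item with
    | some index =>
      match state with
      | [] => []
      | h :: rows => h :: rows.map (pvFixA sentinel_value index)
    | none => state
  else state

def clense_ints (int_feilds : List String) (csv : List (List String)) (sentinel_value : String) : List (List String) :=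
  match csv with
  | [] => []   -- Python A raises IndexError on csv[0]; excluded by Pre_
  | header :: rows => int_feilds.foldl (pvStepA header sentinel_value) (header :: rows)

-- ===== PORT B =====
-- _intlike(cell): int(cell) succeeds?
def pvIntlike (cell : String) : Bool := (PySem.Int.ofStr? cell).isSome

-- positions[name] = positions.get(name, []) + [j]  over  enumerate(header)
def pvPositions (header : List String) : PySem.Dict String (List Int) :=
  (PySem.List.enumerate header).foldl
    (fun d p => d.modify p.2 [] (· ++ [p.1])) PySem.Dict.empty

-- targets.add(occ[0]) for each field whose occurrence list has length 1
def pvTargets (int_feilds : List String) (positions : PySem.Dict String (List Int)) : PySem.Set Int :=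
  int_feilds.foldl (fun s f =>
    let occ := positions.getD f []
    if occ.length = 1 then PySem.Set.add s (occ.headD 0) else s) PySem.Set.empty

def clense_ints_alt (int_feilds : List String) (csv : List (List String)) (sentinel_value : String) : List (List String) :=
  match csv with
  | [] => []   -- Python B raises IndexError on csv[0]; excluded by Pre_
  | header :: rows =>
    let targets := pvTargets int_feilds (pvPositions header)
    header :: rows.map (fun row =>
      (PySem.List.enumerate row).map (fun p =>
        if targets.contains p.1 && !(pvIntlike p.2) then sentinel_value else p.2))

-- ===== PRECONDITION & SPEC =====
-- Pre_ excludes exactly the inputs where Python A raises: an empty csv (csv[0] is an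
-- IndexError) and ragged tables where a targeted column index falls outside some data
-- row (the bare except catches the IndexError and the sentinel assignment re-raises it).
def Pre_clense_ints (int_feilds : List String) (csv : List (List String)) (sentinel_value : String) : Prop :=
  csv ≠ [] ∧
  ∀ item ∈ int_feilds, PySem.List.count (csv.headD []) item = 1 →
    ∀ row ∈ csv.tail, (PySem.List.index? (csv.headD []) item).getD 0 < row.length
instance (int_feilds : List String) (csv : List (List String)) (sentinel_value : String) : Decidable (Pre_clense_ints int_feilds csv sentinel_value) := by unfold Pre_clense_ints; infer_instance

def pvWitness_clense_ints : List String × List (List String) × String :=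
  (["a", "b"], [["a", "b"], ["7", "x"], [" 2 ", "y"]], "-9999")

def Spec_clense_ints (int_feilds : List String) (csv : List (List String)) (sentinel_value : String) (out : List (List String)) : Prop := out = clense_ints_alt int_feilds csv sentinel_value
instance (int_feilds : List String) (csv : List (List String)) (sentinel_value : String) (out : List (List String)) : Decidable (Spec_clense_ints int_feilds csv sentinel_value out) := by unfold Spec_clense_ints; infer_instance

-- ===== CLAIM (what is proved, stated in full; the proofs are below) =====
def Claim_equal_clense_ints : Prop := ∀ (int_feilds : List String) (csv : List (List String)) (sentinel_value : String), Dom_clense_ints int_feilds csv sentinel_value → Pre_clense_ints int_feilds csv sentinel_value → Spec_clense_ints int_feilds csv sentinel_value (clense_ints int_feilds csv sentinel_value)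

-- ===== LEMMAS AND PROOFS =====

-- proof-only helpers: an index-list normal form shared by both characterizations
def pvFixB (sentinel_value : String) (row : List String) (idx : Nat) : List String :=
  match PySem.List.pyGet? row (idx : Int) with
  | some cell => if (PySem.Int.ofStr? cell).isSome then row else row.set idx sentinel_value
  | none => row.set idx sentinel_value

def pvIdxs (header : List String) (int_feilds : List String) : List Nat :=
  int_feilds.foldl (fun acc item =>
    if PySem.List.count header item = 1 then
      match PySem.List.index? header item with
      | some i => acc ++ [i]
      | none => acc
    else acc) []

-- the two cell-fixers compute the same row
lemma pvFix_eq (s : String) (i : Nat) (row : List String) :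
    pvFixA s i row = pvFixB s row i := by
  unfold pvFixA pvFixB
  cases PySem.List.pyGet? row (i : Int) with
  | none => rfl
  | some cell => cases h : PySem.Int.ofStr? cell <;> simp [h]

-- a field whose count in the header is 1 has an index in the header
lemma index?_isSome_of_count_one (l : List String) (v : String)
    (h : PySem.List.count l v = 1) : ∃ i, PySem.List.index? l v = some i := by
  have hm : v ∈ l := by
    rw [PySem.List.count_eq] at h
    exact List.count_pos_iff.mp (by omega)
  exact Option.isSome_iff_exists.mp ((PySem.List.index?_isSome_iff l v).mpr hm)

-- invariant: folding A's field-major steps over a state whose data rows already carry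
-- the fixes for the index list `acc` equals applying the row-major fold for the index
-- list extended by the indices these fields contribute
lemma fold_stepA_eq (header : List String) (s : String) (rows : List (List String))
    (fields : List String) (acc : List Nat) :
    fields.foldl (pvStepA header s)
        (header :: rows.map (fun r => acc.foldl (pvFixB s) r)) =
      header :: rows.map (fun r =>
        (fields.foldl (fun a item =>
          if PySem.List.count header item = 1 then
            match PySem.List.index? header item with
            | some i => a ++ [i]
            | none => a
          else a) acc).foldl (pvFixB s) r) := by
  induction fields generalizing acc with
  | nil => rfl
  | cons item rest ih =>
    simp only [List.foldl_cons]
    by_cases hc : PySem.List.count header item = 1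
    · rcases index?_isSome_of_count_one header item hc with ⟨i, hi⟩
      have hstep : pvStepA header s (header :: rows.map (fun r => acc.foldl (pvFixB s) r)) item
          = header :: rows.map (fun r => (acc ++ [i]).foldl (pvFixB s) r) := by
        unfold pvStepA
        simp only [List.headD_cons]
        rw [if_pos hc, hi]
        simp only [List.map_map]
        refine congrArg (header :: ·) (List.map_congr_left ?_)
        intro r _
        simp [Function.comp, pvFix_eq, List.foldl_append]
      rw [hstep, hc, if_pos rfl, hi, ih (acc ++ [i])]
    · have hstep : pvStepA header s (header :: rows.map (fun r => acc.foldl (pvFixB s) r)) item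
          = header :: rows.map (fun r => acc.foldl (pvFixB s) r) := by
        unfold pvStepA
        simp only [List.headD_cons]
        rw [if_neg hc]
      rw [hstep, if_neg hc, ih acc]

-- length and cells of one fix
lemma length_pvFixB (s : String) (row : List String) (i : Nat) :
    (pvFixB s row i).length = row.length := by
  unfold pvFixB
  cases PySem.List.pyGet? row (i : Int) with
  | none => simp
  | some cell => by_cases hp : (PySem.Int.ofStr? cell).isSome <;> simp [hp]

lemma getElem_pvFixB (s : String) (row : List String) (i k : Nat)
    (h : k < row.length) :
    (pvFixB s row i)[k]'(by rw [length_pvFixB]; exact h) =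
      if k = i ∧ (PySem.Int.ofStr? row[k]).isNone then s else row[k] := by
  by_cases hi : i < row.length
  · by_cases hp : (PySem.Int.ofStr? (row[i]'hi)).isSome
    · have hd : pvFixB s row i = row := by
        unfold pvFixB; rw [PySem.List.pyGet?_natCast, List.getElem?_eq_getElem hi]
        simp [hp]
      simp only [hd]
      rw [if_neg]
      rintro ⟨rfl, hn⟩
      rw [Option.isNone_iff_eq_none] at hn
      simp [hn] at hp
    · have hd : pvFixB s row i = row.set i s := by
        unfold pvFixB; rw [PySem.List.pyGet?_natCast, List.getElem?_eq_getElem hi]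
        simp [hp]
      simp only [hd, List.getElem_set]
      by_cases hk : i = k
      · subst hk
        rw [if_pos rfl, if_pos ⟨rfl, by cases hE : PySem.Int.ofStr? row[i] <;> simp_all⟩]
      · rw [if_neg hk, if_neg (by rintro ⟨rfl, _⟩; exact hk rfl)]
  · have hd : pvFixB s row i = row.set i s := by
      unfold pvFixB; rw [PySem.List.pyGet?_natCast, List.getElem?_eq_none (by omega)]
    simp only [hd, List.getElem_set]
    rw [if_neg (by omega), if_neg (by rintro ⟨rfl, _⟩; omega)]

-- cells of the whole index-list fold
lemma length_foldl_fixB (s : String) (idxs : List Nat) (row : List String) :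
    (idxs.foldl (pvFixB s) row).length = row.length := by
  induction idxs generalizing row with
  | nil => rfl
  | cons i rest ih => simp [List.foldl_cons, ih, length_pvFixB]

lemma getElem_foldl_fixB (s : String) (idxs : List Nat) (row : List String) (k : Nat)
    (h : k < row.length) :
    (idxs.foldl (pvFixB s) row)[k]'(by rw [length_foldl_fixB]; exact h) =
      if k ∈ idxs ∧ (PySem.Int.ofStr? row[k]).isNone then s else row[k] := by
  induction idxs generalizing row with
  | nil => simp
  | cons i rest ih =>
    simp only [List.foldl_cons]
    have hk' : k < (pvFixB s row i).length := by rw [length_pvFixB]; exact h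
    rw [ih (pvFixB s row i) hk', getElem_pvFixB s row i k h]
    by_cases hP : k = i <;> by_cases hQ : (PySem.Int.ofStr? row[k]).isNone <;>
      by_cases hR : k ∈ rest <;>
      simp [hP, hQ, hR, List.mem_cons] <;> split_ifs <;> simp_all

-- occurrence lists extracted from enumerate
lemma enumFilter_length (header : List String) (f : String) (s : Int) :
    ((((PySem.List.enumerate header s).filter (fun p => p.2 == f)).map (·.1)).length)
      = PySem.List.count header f := by
  induction header generalizing s with
  | nil => simp [PySem.List.enumerate_nil, PySem.List.count_eq]
  | cons x xs ih =>
    rw [PySem.List.enumerate_cons]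
    by_cases hx : x = f
    · simp [hx, List.count_cons, ih (s+1), PySem.List.count_eq]
    · simp [hx, List.count_cons, ih (s+1), PySem.List.count_eq]

lemma enumFilter_head (header : List String) (f : String) (s : Int)
    (h : PySem.List.count header f = 1) :
    (((PySem.List.enumerate header s).filter (fun p => p.2 == f)).map (·.1)).headD 0
      = s + (header.idxOf f : Int) := by
  induction header generalizing s with
  | nil => simp [PySem.List.count_eq] at h
  | cons x xs ih =>
    rw [PySem.List.enumerate_cons]
    by_cases hx : x = f
    · simp [hx, List.idxOf_cons_self]
    · have hcount : PySem.List.count xs f = 1 := by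
        rw [PySem.List.count_eq] at h ⊢
        simpa [List.count_cons, hx] using h
      simp only [List.filter_cons]
      have : ((s, x).2 == f) = false := by simp [hx]
      simp only [this, Bool.false_eq_true, if_false]
      rw [ih (s+1) hcount]
      rw [List.idxOf_cons_ne _ (by simpa using hx)]
      push_cast
      ring

-- the dict of B characterized as an occurrence list
lemma getD_pvPositions (header : List String) (f : String) :
    (pvPositions header).getD f [] =
      ((PySem.List.enumerate header).filter (fun p => p.2 == f)).map (·.1) := by
  unfold pvPositions
  rw [show (PySem.List.enumerate header).foldl
        (fun d p => d.modify p.2 [] (· ++ [p.1])) PySem.Dict.empty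
      = ((PySem.List.enumerate header).map Prod.swap).foldl
        (fun d q => d.modify q.1 [] (· ++ [q.2])) PySem.Dict.empty from by
    rw [List.foldl_map]
    rfl]
  rw [PySem.Dict.getD_foldl_modify_append]
  simp only [List.filter_map, List.map_map]
  rfl

-- membership in the target set / index list
lemma mem_foldl_targets (fl : List String) (pos : PySem.Dict String (List Int))
    (s0 : PySem.Set Int) (y : Int) :
    (y ∈ fl.foldl (fun s f =>
        let occ := pos.getD f []
        if occ.length = 1 then PySem.Set.add s (occ.headD 0) else s) s0) ↔
      y ∈ s0 ∨ ∃ f ∈ fl, (pos.getD f []).length = 1 ∧ (pos.getD f []).headD 0 = y := by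
  induction fl generalizing s0 with
  | nil => simp
  | cons f rest ih =>
    simp only [List.foldl_cons]
    by_cases hc : (pos.getD f []).length = 1
    · rw [if_pos hc, ih]
      rw [PySem.Set.mem_add]
      constructor
      · rintro (⟨h | h⟩ | h)
        · exact Or.inl h
        · exact Or.inr ⟨f, List.mem_cons_self, hc, h.symm⟩
        · rcases h with ⟨g, hg, h1, h2⟩; exact Or.inr ⟨g, List.mem_cons_of_mem _ hg, h1, h2⟩
      · rintro (h | ⟨g, hg, h1, h2⟩)
        · exact Or.inl (Or.inl h)
        · rcases List.mem_cons.mp hg with rfl | hg'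
          · exact Or.inl (Or.inr h2.symm)
          · exact Or.inr ⟨g, hg', h1, h2⟩
    · rw [if_neg hc, ih]
      constructor
      · rintro (h | ⟨g, hg, h1, h2⟩)
        · exact Or.inl h
        · exact Or.inr ⟨g, List.mem_cons_of_mem _ hg, h1, h2⟩
      · rintro (h | ⟨g, hg, h1, h2⟩)
        · exact Or.inl h
        · rcases List.mem_cons.mp hg with rfl | hg'
          · exact absurd h1 hc
          · exact Or.inr ⟨g, hg', h1, h2⟩

lemma mem_pvIdxs (header int_feilds : List String) (i : Nat) :
    i ∈ pvIdxs header int_feilds ↔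
      ∃ f ∈ int_feilds, PySem.List.count header f = 1 ∧ PySem.List.index? header f = some i := by
  unfold pvIdxs
  suffices h : ∀ acc : List Nat, (i ∈ int_feilds.foldl (fun acc item =>
      if PySem.List.count header item = 1 then
        match PySem.List.index? header item with
        | some j => acc ++ [j]
        | none => acc
      else acc) acc) ↔
      i ∈ acc ∨ ∃ f ∈ int_feilds, PySem.List.count header f = 1 ∧ PySem.List.index? header f = some i by
    rw [h []]; simp
  intro acc
  induction int_feilds generalizing acc with
  | nil => simp
  | cons f rest ih =>
    simp only [List.foldl_cons]
    by_cases hc : PySem.List.count header f = 1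
    · rcases index?_isSome_of_count_one header f hc with ⟨j, hj⟩
      rw [if_pos hc, hj, ih]
      simp only [List.mem_append, List.mem_singleton, List.mem_cons]
      constructor
      · rintro (⟨h | rfl | hF⟩ | h)
        · exact Or.inl h
        · exact Or.inr ⟨f, Or.inl rfl, hc, hj⟩
        · cases hF
        · rcases h with ⟨g, hg, h1, h2⟩; exact Or.inr ⟨g, Or.inr hg, h1, h2⟩
      · rintro (h | ⟨g, hg | hg, h1, h2⟩)
        · exact Or.inl (Or.inl h)
        · subst hg; rw [hj] at h2; exact Or.inl (Or.inr (Or.inl (Option.some_injective _ h2).symm))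
        · exact Or.inr ⟨g, hg, h1, h2⟩
    · rw [if_neg hc, ih]
      simp only [List.mem_cons]
      constructor
      · rintro (h | ⟨g, hg, h1, h2⟩)
        · exact Or.inl h
        · exact Or.inr ⟨g, Or.inr hg, h1, h2⟩
      · rintro (h | ⟨g, hg | hg, h1, h2⟩)
        · exact Or.inl h
        · subst hg; exact absurd h1 hc
        · exact Or.inr ⟨g, hg, h1, h2⟩

-- index? agrees with idxOf on members / unique fields
lemma idxOf?_eq_some_idxOf (l : List String) (v : String) (h : v ∈ l) :
    l.idxOf? v = some (l.idxOf v) := by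
  induction l with
  | nil => cases h
  | cons x xs ih =>
    by_cases hx : x = v
    · subst hx; simp [List.idxOf?_cons, List.idxOf_cons_self]
    · rcases List.mem_cons.mp h with rfl | hm
      · exact absurd rfl hx
      · simp [List.idxOf?_cons, hx, ih hm, beq_iff_eq]

lemma index?_eq_some_idxOf_of_count_one (header : List String) (f : String)
    (hc : PySem.List.count header f = 1) :
    PySem.List.index? header f = some (header.idxOf f) := by
  have hm : f ∈ header := by
    rw [PySem.List.count_eq] at hc
    exact List.count_pos_iff.mp (by omega)
  rw [PySem.List.index?_eq_idxOf?]
  exact idxOf?_eq_some_idxOf header f hm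

-- the two membership tests agree
lemma contains_pvTargets (header int_feilds : List String) (j : Int) :
    (pvTargets int_feilds (pvPositions header)).contains j
      = decide (∃ i ∈ pvIdxs header int_feilds, (i : Int) = j) := by
  have hmem : j ∈ pvTargets int_feilds (pvPositions header) ↔
      ∃ i ∈ pvIdxs header int_feilds, (i : Int) = j := by
    unfold pvTargets
    rw [mem_foldl_targets]
    simp only [PySem.Set.empty, List.not_mem_nil, false_or]
    constructor
    · rintro ⟨f, hf, h1, h2⟩
      rw [getD_pvPositions, enumFilter_length] at h1
      rw [getD_pvPositions, enumFilter_head header f 0 h1, zero_add] at h2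
      exact ⟨header.idxOf f, (mem_pvIdxs header int_feilds _).mpr
        ⟨f, hf, h1, index?_eq_some_idxOf_of_count_one header f h1⟩, h2⟩
    · rintro ⟨i, hi, rfl⟩
      rcases (mem_pvIdxs header int_feilds i).mp hi with ⟨f, hf, h1, h2⟩
      have hidx : i = header.idxOf f := by
        rw [index?_eq_some_idxOf_of_count_one header f h1] at h2
        exact (Option.some_injective _ h2.symm)
      refine ⟨f, hf, ?_, ?_⟩
      · rw [getD_pvPositions, enumFilter_length]; exact h1
      · rw [getD_pvPositions, enumFilter_head header f 0 h1, zero_add, hidx]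
  by_cases hP : ∃ i ∈ pvIdxs header int_feilds, (i : Int) = j
  · rw [decide_eq_true hP]
    exact (PySem.Set.contains_iff _ _).mpr (hmem.mpr hP)
  · rw [decide_eq_false hP]
    rw [← Bool.not_eq_true]
    intro hcon
    exact hP (hmem.mp ((PySem.Set.contains_iff _ _).mp hcon))

-- the row-major fold equals B's enumerate map
lemma foldl_fixB_eq_map (s : String) (header int_feilds : List String) (row : List String) :
    (pvIdxs header int_feilds).foldl (pvFixB s) row =
      (PySem.List.enumerate row).map (fun p =>
        if (pvTargets int_feilds (pvPositions header)).contains p.1 && !(pvIntlike p.2)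
        then s else p.2) := by
  apply List.ext_getElem
  · rw [length_foldl_fixB, List.length_map, PySem.List.length_enumerate]
  · intro k h1 h2
    have hk : k < row.length := by rwa [length_foldl_fixB] at h1
    rw [getElem_foldl_fixB s _ row k hk]
    rw [List.getElem_map]
    rw [PySem.List.getElem_enumerate]
    simp only [zero_add]
    rw [contains_pvTargets]
    have hdec : (decide (∃ i ∈ pvIdxs header int_feilds, (i : Int) = (k : Int)))
        = decide (k ∈ pvIdxs header int_feilds) := by
      simp [Int.natCast_inj]
    rw [hdec]
    unfold pvIntlike
    by_cases hm : k ∈ pvIdxs header int_feilds <;>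
      by_cases hp : (PySem.Int.ofStr? row[k]).isNone <;>
      simp [hm, hp] <;> simp_all [Option.isNone_iff_eq_none]

-- ===== VERDICT (by name: the statement is the Claim_ definition above) =====
theorem clense_ints_spec : Claim_equal_clense_ints := by
  intro int_feilds csv sentinel_value _ _
  unfold Spec_clense_ints clense_ints clense_ints_alt
  cases csv with
  | nil => rfl
  | cons header rows =>
    show int_feilds.foldl (pvStepA header sentinel_value) (header :: rows) = _
    have h0 : header :: rows =
        header :: rows.map (fun r => ([] : List Nat).foldl (pvFixB sentinel_value) r) := by
      simp
    conv_lhs => rw [h0]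
    rw [fold_stepA_eq]
    show _ = header :: rows.map (fun row =>
      (PySem.List.enumerate row).map (fun p =>
        if (pvTargets int_feilds (pvPositions header)).contains p.1 && !(pvIntlike p.2)
        then sentinel_value else p.2))
    refine congrArg (header :: ·) (List.map_congr_left ?_)
    intro r _
    exact foldl_fixB_eq_map sentinel_value header int_feilds r
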